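-- pv_equiv track=rewrite | github.com/janetyq/Finite-Element-Solver | utils/helper.py | get_boundary_from_vertices_elements
-- ===== SOURCE A (Python) =====
-- def get_boundary_from_vertices_elements(vertices, elements):
--     edges = set()
--     boundary_edges = set()
--
--     # Step 1: Convert elements to edges
--     for element in elements:
--         for i in range(3):  # Each element is a triangle (3 vertices)
--             edge = tuple(sorted([element[i], element[(i + 1) % 3]]))  # Edges are represented by sorted vertex indices
--             if edge in edges:
--                 # If edge is already in set, it's an interior edge, remove it from edges
--                 edges.remove(edge)
--             else:
--                 # If edge is not in set, it's a new edge, add it to edges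
--                 edges.add(edge)
--
--     # Step 2: Identify boundary edges
--     for edge in edges:
--         count = 0
--         for element in elements:
--             if edge[0] in element and edge[1] in element:
--                 count += 1
--         if count == 1:
--             boundary_edges.add(edge)
--
--     boundary_edges = [list(edge) for edge in boundary_edges]
--
--     return boundary_edges
-- ===== SOURCE B (Python) =====
-- def get_boundary_from_vertices_elements(vertices, elements):
--     # One pass over the elements: toggle each edge's parity in 'odd' and build an
--     # inverted index vertex -> set of element indices; an edge is a boundary edge
--     # iff its parity is odd and its endpoints' index sets intersect in one element.
--     odd = set()
--     where = {}
--     for t, element in enumerate(elements):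
--         for i in range(3):
--             a = element[i]
--             b = element[(i + 1) % 3]
--             e = (a, b) if a <= b else (b, a)
--             odd ^= {e}
--         for v in element:
--             where.setdefault(v, set()).add(t)
--     return [[a, b] for (a, b) in odd if len(where[a] & where[b]) == 1]
-- ===== Notes on version B (the rewrite author's own statement) =====
-- stated objective: faster
-- what changed: B makes one pass over the elements, toggling edge parity with a set symmetric difference and building an inverted index from vertex to the set of element indices containing it, so A's second pass (a full scan over all elements for every surviving edge) is replaced by one set intersection per surviving edge.
import Mathlib
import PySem

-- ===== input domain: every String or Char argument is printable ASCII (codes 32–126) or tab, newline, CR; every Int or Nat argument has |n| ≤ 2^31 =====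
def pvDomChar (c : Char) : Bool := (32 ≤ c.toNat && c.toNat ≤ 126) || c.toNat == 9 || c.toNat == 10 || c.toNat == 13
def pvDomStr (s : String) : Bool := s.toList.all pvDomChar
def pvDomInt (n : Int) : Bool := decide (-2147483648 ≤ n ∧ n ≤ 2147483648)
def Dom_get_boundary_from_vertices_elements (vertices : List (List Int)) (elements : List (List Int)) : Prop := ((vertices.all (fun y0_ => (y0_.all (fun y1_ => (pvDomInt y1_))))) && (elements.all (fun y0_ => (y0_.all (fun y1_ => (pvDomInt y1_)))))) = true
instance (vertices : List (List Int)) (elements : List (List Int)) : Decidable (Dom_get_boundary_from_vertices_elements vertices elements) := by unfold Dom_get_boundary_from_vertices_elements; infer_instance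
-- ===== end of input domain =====

-- B replaces A's quadratic second pass (for every surviving edge, a scan over all
-- elements) by an inverted index vertex -> element indices built in the single pass;
-- the Python outputs are lists built from Python sets, whose hash iteration order is
-- accidental and compared as sets — both ports iterate in first-insertion order.


-- tuple(sorted([a, b])) on a two-element list of ints (shared by both ports)
def pvSortPair (a b : Int) : Int × Int := if a ≤ b then (a, b) else (b, a)

-- ===== PORT A =====
-- 'edge[k] in element' (Python list membership, combined with 'and') is List.contains;
-- 'edges.remove(edge)' is guarded by the 'in' test, so it is Set.discard (no KeyError).
def get_boundary_from_vertices_elements (vertices : List (List Int)) (elements : List (List Int)) : List (List Int) :=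
  -- Step 1: toggle each triangle edge in the set 'edges'
  let edges : PySem.Set (Int × Int) :=
    elements.foldl (fun edges element =>
      (PySem.List.pyRange 0 3 1).foldl (fun edges i =>
        let edge := pvSortPair (PySem.List.pyGetD element i 0)
                               (PySem.List.pyGetD element (PySem.Int.mod (i + 1) 3) 0)
        if PySem.Set.contains edges edge then PySem.Set.discard edges edge
        else PySem.Set.add edges edge) edges) PySem.Set.empty
  -- Step 2: keep the edges whose two endpoints lie in exactly one element
  let boundary_edges : PySem.Set (Int × Int) :=
    edges.foldl (fun bs edge =>
      let count : Int := elements.foldl (fun c element =>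
        if element.contains edge.1 && element.contains edge.2 then c + 1 else c) 0
      if count = 1 then PySem.Set.add bs edge else bs) PySem.Set.empty
  boundary_edges.map (fun e => [e.1, e.2])

-- ===== PORT B =====
-- 'where[a]' is a guaranteed hit for an endpoint of a surviving edge (every vertex of
-- every element is indexed), so the lookup is getD with Python's set() as default.
def get_boundary_from_vertices_elements_alt (vertices : List (List Int)) (elements : List (List Int)) : List (List Int) :=
  let st : PySem.Set (Int × Int) × PySem.Dict Int (PySem.Set Int) :=
    (PySem.List.enumerate elements).foldl (fun st te =>
      -- odd ^= {e} for the three cyclic edges e of the triangle te.2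
      let odd := (PySem.List.pyRange 0 3 1).foldl (fun odd i =>
        PySem.Set.symmDiff odd (PySem.Set.ofList
          [pvSortPair (PySem.List.pyGetD te.2 i 0)
                      (PySem.List.pyGetD te.2 (PySem.Int.mod (i + 1) 3) 0)])) st.1
      -- where.setdefault(v, set()).add(t) for every vertex v of the element
      let whereIdx := te.2.foldl (fun d v =>
        d.modify v PySem.Set.empty (fun s => PySem.Set.add s te.1)) st.2
      (odd, whereIdx)) (PySem.Set.empty, PySem.Dict.empty)
  (st.1.filter (fun e =>
      PySem.Set.len (PySem.Set.inter (st.2.getD e.1 PySem.Set.empty)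
                                     (st.2.getD e.2 PySem.Set.empty)) == 1)).map
    (fun e => [e.1, e.2])

-- ===== PRECONDITION & SPEC =====
-- A indexes element[0..2] of every element, so Python raises IndexError iff some element
-- has fewer than three entries; exactly those inputs are excluded.
def Pre_get_boundary_from_vertices_elements (vertices : List (List Int)) (elements : List (List Int)) : Prop :=
  ∀ el ∈ elements, 3 ≤ el.length
instance (vertices : List (List Int)) (elements : List (List Int)) : Decidable (Pre_get_boundary_from_vertices_elements vertices elements) := by unfold Pre_get_boundary_from_vertices_elements; infer_instance

def pvWitness_get_boundary_from_vertices_elements : List (List Int) × List (List Int) :=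
  ([[0, 0], [1, 0], [0, 1]], [[0, 1, 2], [1, 2, 3]])

def Spec_get_boundary_from_vertices_elements (vertices : List (List Int)) (elements : List (List Int)) (out : List (List Int)) : Prop := out = get_boundary_from_vertices_elements_alt vertices elements
instance (vertices : List (List Int)) (elements : List (List Int)) (out : List (List Int)) : Decidable (Spec_get_boundary_from_vertices_elements vertices elements out) := by unfold Spec_get_boundary_from_vertices_elements; infer_instance

-- ===== CLAIM (what is proved, stated in full; the proofs are below) =====
def Claim_equal_get_boundary_from_vertices_elements : Prop := ∀ (vertices : List (List Int)) (elements : List (List Int)), Dom_get_boundary_from_vertices_elements vertices elements → Pre_get_boundary_from_vertices_elements vertices elements → Spec_get_boundary_from_vertices_elements vertices elements (get_boundary_from_vertices_elements vertices elements)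

-- ===== LEMMAS AND PROOFS =====

-- A's toggle (if in: remove else: add) is B's symmetric difference with {e}
theorem pv_toggle_eq (s : PySem.Set (Int × Int)) (e : Int × Int) :
    (if PySem.Set.contains s e then PySem.Set.discard s e else PySem.Set.add s e)
      = PySem.Set.symmDiff s (PySem.Set.ofList [e]) := by
  have h1 : PySem.Set.ofList [e] = [e] := rfl
  by_cases h : e ∈ s
  · simp [PySem.Set.symmDiff, PySem.Set.diff, PySem.Set.discard, h1, PySem.Set.contains, h, beq_eq_decide]
  · simp [PySem.Set.symmDiff, PySem.Set.diff, PySem.Set.add, h1, PySem.Set.contains, h]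
    exact (List.filter_eq_self.mpr (fun x hx => by simp; rintro rfl; exact h hx)).symm

-- the step-1 toggle fold keeps the set Nodup
theorem pv_nodup_toggle (s : PySem.Set (Int × Int)) (e : Int × Int) (hs : s.Nodup) :
    (PySem.Set.symmDiff s (PySem.Set.ofList [e])).Nodup :=
  PySem.Set.nodup_symmDiff _ _ hs (PySem.Set.nodup_ofList _)

theorem pv_nodup_inner (element : List Int) (s : PySem.Set (Int × Int)) (hs : s.Nodup) :
    ((PySem.List.pyRange 0 3 1).foldl (fun odd i =>
      PySem.Set.symmDiff odd (PySem.Set.ofList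
        [pvSortPair (PySem.List.pyGetD element i 0)
                    (PySem.List.pyGetD element (PySem.Int.mod (i + 1) 3) 0)])) s).Nodup := by
  have h3 : PySem.List.pyRange 0 3 1 = [0, 1, 2] := by decide
  rw [h3]
  simp only [List.foldl]
  exact pv_nodup_toggle _ _ (pv_nodup_toggle _ _ (pv_nodup_toggle _ _ hs))

theorem pv_nodup_fold (elements : List (List Int)) (s : PySem.Set (Int × Int)) (hs : s.Nodup) :
    (elements.foldl (fun odd element =>
      (PySem.List.pyRange 0 3 1).foldl (fun odd i =>
        PySem.Set.symmDiff odd (PySem.Set.ofList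
          [pvSortPair (PySem.List.pyGetD element i 0)
                      (PySem.List.pyGetD element (PySem.Int.mod (i + 1) 3) 0)])) odd) s).Nodup := by
  induction elements generalizing s with
  | nil => exact hs
  | cons el els ih => exact ih _ (pv_nodup_inner el s hs)

-- A's step-1 fold equals B's edge-parity fold (pv_toggle_eq pointwise)
theorem pv_step1_eq (elements : List (List Int)) :
    (elements.foldl (fun edges element =>
      (PySem.List.pyRange 0 3 1).foldl (fun edges i =>
        let edge := pvSortPair (PySem.List.pyGetD element i 0)
                               (PySem.List.pyGetD element (PySem.Int.mod (i + 1) 3) 0)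
        if PySem.Set.contains edges edge then PySem.Set.discard edges edge
        else PySem.Set.add edges edge) edges) PySem.Set.empty)
    = (elements.foldl (fun odd element =>
      (PySem.List.pyRange 0 3 1).foldl (fun odd i =>
        PySem.Set.symmDiff odd (PySem.Set.ofList
          [pvSortPair (PySem.List.pyGetD element i 0)
                      (PySem.List.pyGetD element (PySem.Int.mod (i + 1) 3) 0)])) odd) PySem.Set.empty) := by
  congr 1
  funext odd element
  congr 1
  funext s i
  exact pv_toggle_eq s _

-- B's paired fold is the pair of its two independent folds
theorem pv_B_pair (L : List (Int × List Int)) (st : PySem.Set (Int × Int) × PySem.Dict Int (PySem.Set Int)) :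
    (L.foldl (fun st te =>
      (List.foldl (fun odd i =>
          PySem.Set.symmDiff odd (PySem.Set.ofList
            [pvSortPair (PySem.List.pyGetD te.2 i 0)
                        (PySem.List.pyGetD te.2 (PySem.Int.mod (i + 1) 3) 0)])) st.1 (PySem.List.pyRange 0 3),
       List.foldl (fun d v => d.modify v PySem.Set.empty (fun s => PySem.Set.add s te.1)) st.2 te.2)) st)
    = (L.foldl (fun odd te =>
        (PySem.List.pyRange 0 3 1).foldl (fun odd i =>
          PySem.Set.symmDiff odd (PySem.Set.ofList
            [pvSortPair (PySem.List.pyGetD te.2 i 0)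
                        (PySem.List.pyGetD te.2 (PySem.Int.mod (i + 1) 3) 0)])) odd) st.1,
       L.foldl (fun d te => te.2.foldl (fun d v =>
        d.modify v PySem.Set.empty (fun s => PySem.Set.add s te.1)) d) st.2) := by
  induction L generalizing st with
  | nil => rfl
  | cons te rest ih => exact ih _

-- the parity fold over the enumerated elements only reads the element components
theorem pv_odd_enum (elements : List (List Int)) (s : PySem.Set (Int × Int)) :
    ((PySem.List.enumerate elements).foldl (fun odd te =>
      (PySem.List.pyRange 0 3 1).foldl (fun odd i =>
        PySem.Set.symmDiff odd (PySem.Set.ofList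
          [pvSortPair (PySem.List.pyGetD te.2 i 0)
                      (PySem.List.pyGetD te.2 (PySem.Int.mod (i + 1) 3) 0)])) odd) s)
    = (elements.foldl (fun odd element =>
      (PySem.List.pyRange 0 3 1).foldl (fun odd i =>
        PySem.Set.symmDiff odd (PySem.Set.ofList
          [pvSortPair (PySem.List.pyGetD element i 0)
                      (PySem.List.pyGetD element (PySem.Int.mod (i + 1) 3) 0)])) odd) s) := by
  conv_rhs => rw [← PySem.List.map_snd_enumerate elements 0]
  rw [List.foldl_map]

-- one element's pass over the inverted index, seen through one vertex v
theorem pv_inner_where (el : List Int) (t : Int) (d : PySem.Dict Int (PySem.Set Int)) (v : Int) :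
    (el.foldl (fun d w => d.modify w PySem.Set.empty (fun s => PySem.Set.add s t)) d).getD v PySem.Set.empty
      = if v ∈ el then PySem.Set.add (d.getD v PySem.Set.empty) t else d.getD v PySem.Set.empty := by
  induction el generalizing d with
  | nil => simp
  | cons w ws ih =>
    simp only [List.foldl]
    rw [ih]
    rw [PySem.Dict.getD_modify]
    by_cases hvw : v = w
    · subst hvw
      by_cases hv : v ∈ ws <;> simp [hv]
    · by_cases hv : v ∈ ws <;> simp [hv, hvw]

-- the inverted index maps v to the (first components of the) entries containing v
theorem pv_where_spec (L : List (Int × List Int)) (d : PySem.Dict Int (PySem.Set Int)) (v : Int)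
    (hnd : (L.map (·.1)).Nodup)
    (hout : ∀ p ∈ L, p.1 ∉ d.getD v PySem.Set.empty) :
    (L.foldl (fun d te => te.2.foldl (fun d w =>
        d.modify w PySem.Set.empty (fun s => PySem.Set.add s te.1)) d) d).getD v PySem.Set.empty
      = d.getD v PySem.Set.empty ++ (L.filter (fun p => decide (v ∈ p.2))).map (·.1) := by
  induction L generalizing d with
  | nil => simp
  | cons te rest ih =>
    simp only [List.foldl, List.filter]
    have hd' := pv_inner_where te.2 te.1 d v
    have hndr : (rest.map (·.1)).Nodup := (List.nodup_cons.1 hnd).2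
    have hne : ∀ p ∈ rest, p.1 ≠ te.1 := by
      intro p hp hEq
      have hmem : p.1 ∈ rest.map (·.1) := List.mem_map_of_mem hp
      rw [hEq] at hmem
      exact (List.nodup_cons.1 hnd).1 hmem
    by_cases hv : v ∈ te.2
    · have hadd : PySem.Set.add (d.getD v PySem.Set.empty) te.1
          = d.getD v PySem.Set.empty ++ [te.1] :=
        PySem.Set.add_of_not_mem (hout te (by simp))
      rw [ih _ (by exact hndr) (fun p hp => by
          rw [hd']
          simp only [hv, if_pos]
          intro hmem
          rcases (PySem.Set.mem_add _ _ _).1 hmem with h | h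
          · exact hout p (by simp [hp]) h
          · exact hne p hp h)]
      rw [hd', if_pos hv, hadd, List.append_assoc]
      simp [hv]
    · rw [ih _ (by exact hndr) (fun p hp => by
          rw [hd']
          simp only [hv, if_false]
          exact hout p (by simp [hp])), hd']
      simp [hv]

-- the size of the intersection of two index sets counts the entries containing both
theorem pv_len_inter (L : List (Int × List Int)) (hnd : (L.map (·.1)).Nodup) (a b : Int) :
    PySem.Set.len (PySem.Set.inter ((L.filter (fun p => decide (a ∈ p.2))).map (·.1))
                                   ((L.filter (fun p => decide (b ∈ p.2))).map (·.1)))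
      = (L.countP (fun p => decide (a ∈ p.2) && decide (b ∈ p.2)) : Int) := by
  unfold PySem.Set.len PySem.Set.inter
  congr 1
  rw [List.filter_map, List.length_map, ← List.countP_eq_length_filter]
  have h1 : ((L.filter (fun p => decide (a ∈ p.2))).countP
        ((fun t => PySem.Set.contains ((L.filter (fun q => decide (b ∈ q.2))).map (·.1)) t) ∘ (·.1)))
      = (L.filter (fun p => decide (a ∈ p.2))).countP (fun p => decide (b ∈ p.2)) := by
    apply List.countP_congr
    intro p hp
    have hpL : p ∈ L := List.mem_of_mem_filter hp
    simp only [Function.comp]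
    constructor
    · intro h
      have hmem : p.1 ∈ (L.filter (fun q => decide (b ∈ q.2))).map (·.1) := by
        simpa [List.contains_iff_mem] using h
      rcases List.mem_map.1 hmem with ⟨q, hq, hq1⟩
      have hqL : q ∈ L := List.mem_of_mem_filter hq
      have hqb : b ∈ q.2 := by
        have := List.of_mem_filter hq
        simpa using this
      have : q = p := List.inj_on_of_nodup_map hnd hqL hpL hq1
      subst this
      simpa using hqb
    · intro h
      have hb : b ∈ p.2 := by simpa using h
      have : p.1 ∈ (L.filter (fun q => decide (b ∈ q.2))).map (·.1) :=
        List.mem_map_of_mem (List.mem_filter.2 ⟨hpL, by simpa using hb⟩)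
      simpa [List.contains_iff_mem] using this
  rw [h1, List.countP_filter]
  exact List.countP_congr (fun p _ => by rw [Bool.and_comm])

-- A's boundary-set fold over a Nodup list is a filter
theorem pv_foldl_addif_eq_filter (p : Int × Int → Prop) [DecidablePred p]
    (l : List (Int × Int)) (acc : PySem.Set (Int × Int))
    (hnd : l.Nodup) (hdisj : ∀ x ∈ l, x ∉ acc) :
    l.foldl (fun s e => if p e then PySem.Set.add s e else s) acc
      = acc ++ l.filter (fun e => decide (p e)) := by
  induction l generalizing acc with
  | nil => simp
  | cons x xs ih =>
    simp only [List.foldl, List.filter]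
    by_cases hx : p x
    · rw [if_pos hx, PySem.Set.add_of_not_mem (hdisj x (by simp))]
      rw [ih (acc ++ [x]) hnd.of_cons]
      · simp [hx]
      · intro y hy
        simp only [List.mem_append, List.mem_singleton]
        rintro (h | rfl)
        · exact hdisj y (by simp [hy]) h
        · exact (List.nodup_cons.1 hnd).1 hy
    · rw [if_neg hx, ih acc hnd.of_cons (fun y hy => hdisj y (by simp [hy]))]
      simp [hx]

-- ===== VERDICT (by name: the statement is the Claim_ definition above) =====
theorem get_boundary_from_vertices_elements_spec : Claim_equal_get_boundary_from_vertices_elements := by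
  intro vertices elements _ _
  unfold Spec_get_boundary_from_vertices_elements
  unfold get_boundary_from_vertices_elements get_boundary_from_vertices_elements_alt
  simp only [pv_B_pair, pv_odd_enum, pv_step1_eq]
  set edges := (elements.foldl (fun odd element =>
      (PySem.List.pyRange 0 3 1).foldl (fun odd i =>
        PySem.Set.symmDiff odd (PySem.Set.ofList
          [pvSortPair (PySem.List.pyGetD element i 0)
                      (PySem.List.pyGetD element (PySem.Int.mod (i + 1) 3) 0)])) odd) PySem.Set.empty) with hedges
  have hnd : edges.Nodup := by
    rw [hedges]; exact pv_nodup_fold elements _ List.nodup_nil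
  have hA := pv_foldl_addif_eq_filter
    (p := fun edge => (elements.foldl (fun c element =>
        if element.contains edge.1 && element.contains edge.2 then c + 1 else c) (0 : Int)) = 1)
    edges PySem.Set.empty hnd (by simp [PySem.Set.empty])
  simp only [hA]
  simp only [show (PySem.Set.empty : PySem.Set (Int × Int)) = [] from rfl, List.nil_append]
  congr 1
  apply List.filter_congr
  intro e he
  have hndL : ((PySem.List.enumerate elements).map (·.1)).Nodup := by
    have hp := PySem.List.pairwise_lt_enumerate elements (s := 0)
    exact (List.pairwise_map.2 hp).imp ne_of_lt
  have hW := fun v => pv_where_spec (PySem.List.enumerate elements) PySem.Dict.empty v hndL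
    (by simp [PySem.Dict.getD_empty, PySem.Set.empty])
  have hcnt := PySem.List.foldl_count_if
    (fun element => element.contains e.1 && element.contains e.2) elements 0
  simp only [hcnt, hW, PySem.Dict.getD_empty]
  simp only [show (PySem.Set.empty : PySem.Set Int) = [] from rfl, List.nil_append]
  rw [pv_len_inter _ hndL]
  have hcongr : (PySem.List.enumerate elements).countP
        (fun p => decide (e.1 ∈ p.2) && decide (e.2 ∈ p.2))
      = elements.countP (fun el => el.contains e.1 && el.contains e.2) := by
    conv_rhs => rw [← PySem.List.map_snd_enumerate elements 0]
    rw [List.countP_map]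
    apply List.countP_congr
    intro p _
    simp [Function.comp]
  rw [hcongr]
  simp [beq_eq_decide, Nat.cast_eq_one]
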